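-- pv_equiv track=rewrite | github.com/paiml/depyler | examples/hard_band_matrix.py | band_matvec
-- ===== SOURCE A (Python) =====
-- def band_matvec(lower: list[int], main: list[int], upper: list[int], vec: list[int]) -> list[int]:
--     n: int = len(main)
--     result: list[int] = []
--     i: int = 0
--     while i < n:
--         val: int = main[i] * vec[i]
--         if i > 0:
--             val = val + lower[i - 1] * vec[i - 1]
--         if i < n - 1:
--             val = val + upper[i] * vec[i + 1]
--         result.append(val)
--         i = i + 1
--     return result
-- ===== SOURCE B (Python) =====
-- def band_matvec(lower: list[int], main: list[int], upper: list[int], vec: list[int]) -> list[int]: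
--     n = len(main)
--     # whole-list dataflow: build the three diagonal product streams (shifted/padded
--     # to align with the rows) and sum them elementwise; no index arithmetic at all.
--     diag = [m * x for m, x in zip(main, vec)]
--     sub = [0] + [l * x for l, x in zip(lower[:n - 1], vec)]
--     sup = [u * x for u, x in zip(upper[:n - 1], vec[1:])] + [0]
--     return [a + b + c for a, b, c in zip(diag, sub, sup)]
-- ===== Notes on version B (the rewrite author's own statement) =====
-- stated objective: alternative
-- what changed: B is a whole-list dataflow version: it zips each diagonal with the (shifted) vector into three product streams, pads/offsets them to align with the rows, and sums the three streams elementwise, with no index arithmetic or per-row conditionals; A walks rows with an index loop and boundary branches.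
import Mathlib
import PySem

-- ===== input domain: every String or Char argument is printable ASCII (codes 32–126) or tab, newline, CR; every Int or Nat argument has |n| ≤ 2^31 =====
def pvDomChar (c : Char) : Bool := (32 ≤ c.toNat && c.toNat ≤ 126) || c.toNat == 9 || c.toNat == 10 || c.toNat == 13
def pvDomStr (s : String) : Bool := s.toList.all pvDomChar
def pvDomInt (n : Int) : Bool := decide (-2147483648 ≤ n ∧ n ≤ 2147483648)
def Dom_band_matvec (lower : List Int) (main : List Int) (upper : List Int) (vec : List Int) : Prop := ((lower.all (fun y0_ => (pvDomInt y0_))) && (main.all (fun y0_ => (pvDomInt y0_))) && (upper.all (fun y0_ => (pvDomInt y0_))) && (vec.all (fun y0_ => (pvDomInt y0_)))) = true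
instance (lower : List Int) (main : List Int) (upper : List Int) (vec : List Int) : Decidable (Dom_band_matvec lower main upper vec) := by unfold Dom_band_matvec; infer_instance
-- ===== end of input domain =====

-- B is a whole-list dataflow version: three zipped diagonal product streams, shifted/padded
-- to row alignment and summed elementwise, instead of A's index loop with boundary branches;
-- objective: alternative.

-- ===== PORT A =====
-- while loop of A, recursion on the loop counter i; list indexing is in range under Pre_,
-- so getD i 0 is exact there (Python indices here are always nonnegative).
def bandGoA (lower : List Int) (main : List Int) (upper : List Int) (vec : List Int)
    (n : Nat) (i : Nat) : List Int :=
  if i < n then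
    let val : Int := main.getD i 0 * vec.getD i 0
    let val : Int := if 0 < i then val + lower.getD (i - 1) 0 * vec.getD (i - 1) 0 else val
    let val : Int := if i < n - 1 then val + upper.getD i 0 * vec.getD (i + 1) 0 else val
    val :: bandGoA lower main upper vec n (i + 1)
  else []
termination_by n - i

def band_matvec (lower : List Int) (main : List Int) (upper : List Int) (vec : List Int) : List Int :=
  bandGoA lower main upper vec main.length 0

-- ===== PORT B =====
-- zip is List.zip (truncating, as Python's); lower[:n-1] / upper[:n-1] is PySem.List.slice
-- (exact, including the n = 0 case where n-1 is the negative index -1); vec[1:] is drop 1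
-- (exact: the start index is the literal 1).
def band_matvec_alt (lower : List Int) (main : List Int) (upper : List Int) (vec : List Int) : List Int :=
  let n : Int := main.length
  let diag := (main.zip vec).map (fun p => p.1 * p.2)
  let sub := 0 :: ((PySem.List.slice lower none (some (n - 1))).zip vec).map (fun p => p.1 * p.2)
  let sup := ((PySem.List.slice upper none (some (n - 1))).zip (vec.drop 1)).map (fun p => p.1 * p.2) ++ [0]
  (diag.zip (sub.zip sup)).map (fun p => p.1 + p.2.1 + p.2.2)

-- ===== PRECONDITION & SPEC =====
-- Pre_ excludes exactly the inputs where A raises IndexError: the vector shorter than the main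
-- diagonal, or an off-diagonal shorter than n-1.
def Pre_band_matvec (lower : List Int) (main : List Int) (upper : List Int) (vec : List Int) : Prop :=
  main.length ≤ vec.length ∧ main.length ≤ lower.length + 1 ∧ main.length ≤ upper.length + 1
instance (lower : List Int) (main : List Int) (upper : List Int) (vec : List Int) : Decidable (Pre_band_matvec lower main upper vec) := by unfold Pre_band_matvec; infer_instance

def pvWitness_band_matvec : List Int × List Int × List Int × List Int :=
  ([4, 5], [1, 2, 3], [6, 7], [10, 20, 30])

def Spec_band_matvec (lower : List Int) (main : List Int) (upper : List Int) (vec : List Int) (out : List Int) : Prop := out = band_matvec_alt lower main upper vec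
instance (lower : List Int) (main : List Int) (upper : List Int) (vec : List Int) (out : List Int) : Decidable (Spec_band_matvec lower main upper vec out) := by unfold Spec_band_matvec; infer_instance

-- ===== CLAIM (what is proved, stated in full; the proofs are below) =====
def Claim_equal_band_matvec : Prop := ∀ (lower : List Int) (main : List Int) (upper : List Int) (vec : List Int), Dom_band_matvec lower main upper vec → Pre_band_matvec lower main upper vec → Spec_band_matvec lower main upper vec (band_matvec lower main upper vec)

-- ===== LEMMAS AND PROOFS =====

-- the per-row value both programs compute
def bandF (lower : List Int) (main : List Int) (upper : List Int) (vec : List Int)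
    (n i : Nat) : Int :=
  (main.getD i 0 * vec.getD i 0
    + (if 0 < i then lower.getD (i - 1) 0 * vec.getD (i - 1) 0 else 0))
    + (if i < n - 1 then upper.getD i 0 * vec.getD (i + 1) 0 else 0)

theorem bandGoA_eq (lower main upper vec : List Int) (n i : Nat) :
    bandGoA lower main upper vec n i
      = (List.range' i (n - i)).map (bandF lower main upper vec n) := by
  induction hk : n - i generalizing i with
  | zero =>
    rw [bandGoA]
    simp [show ¬ i < n by omega]
  | succ k ih =>
    rw [bandGoA]
    have hi : i < n := by omega
    simp only [if_pos hi, List.range'_succ, List.map_cons]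
    rw [ih (i + 1) (by omega)]
    congr 1
    simp only [bandF]
    split_ifs <;> ring

theorem band_matvec_alt_eq (lower main upper vec : List Int)
    (h1 : main.length ≤ vec.length) (h2 : main.length ≤ lower.length + 1)
    (h3 : main.length ≤ upper.length + 1) :
    band_matvec_alt lower main upper vec
      = (List.range main.length).map (bandF lower main upper vec main.length) := by
  unfold band_matvec_alt
  simp only []
  rcases Nat.eq_zero_or_pos main.length with h0 | hpos
  · rw [List.eq_nil_of_length_eq_zero h0]
    simp
  · set n := main.length with hn
    have hcast : (n : Int) - 1 = ((n - 1 : Nat) : Int) := by omega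
    rw [hcast, PySem.List.slice_to_natCast, PySem.List.slice_to_natCast]
    apply List.ext_getElem
    · simp
      omega
    · intro j hj1 hj2
      have hjn : j < n := by
        simp at hj1
        omega
      simp only [List.getElem_map, List.getElem_zip, List.getElem_range]
      have hsub : (0 :: ((lower.take (n - 1)).zip vec).map (fun p => p.1 * p.2))[j]'(by simp; omega)
          = if 0 < j then lower.getD (j - 1) 0 * vec.getD (j - 1) 0 else 0 := by
        rcases Nat.eq_zero_or_pos j with hj0 | hj0
        · subst hj0; simp
        · have hj' : j - 1 < ((lower.take (n - 1)).zip vec).length := by simp; omega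
          rw [List.getElem_cons]
          rw [dif_neg (by omega : ¬ j = 0)]
          simp only [List.getElem_map, List.getElem_zip, List.getElem_take]
          rw [if_pos hj0]
          rw [List.getD_eq_getElem lower 0 (show j - 1 < lower.length by omega),
            List.getD_eq_getElem vec 0 (show j - 1 < vec.length by omega)]
      have hsup : (((upper.take (n - 1)).zip (vec.drop 1)).map (fun p => p.1 * p.2) ++ [0])[j]'(by simp; omega)
          = if j < n - 1 then upper.getD j 0 * vec.getD (j + 1) 0 else 0 := by
        have hlen : (((upper.take (n - 1)).zip (vec.drop 1)).map (fun p => p.1 * p.2)).length = n - 1 := by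
          simp
          omega
        rcases Nat.lt_or_ge j (n - 1) with hlt | hge
        · rw [List.getElem_append_left (by omega)]
          simp only [List.getElem_map, List.getElem_zip, List.getElem_take, List.getElem_drop]
          rw [if_pos hlt]
          rw [List.getD_eq_getElem upper 0 (show j < upper.length by omega),
            List.getD_eq_getElem vec 0 (show j + 1 < vec.length by omega)]
          simp [Nat.add_comm]
        · rw [List.getElem_append_right (by omega)]
          simp [if_neg (by omega : ¬ j < n - 1)]
      rw [hsub, hsup, bandF]
      rw [List.getD_eq_getElem main 0 (show j < main.length from hjn),
        List.getD_eq_getElem vec 0 (show j < vec.length by omega)]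

-- ===== VERDICT (by name: the statement is the Claim_ definition above) =====
theorem band_matvec_spec : Claim_equal_band_matvec := by
  intro lower main upper vec _ hpre
  unfold Spec_band_matvec band_matvec
  rw [bandGoA_eq, band_matvec_alt_eq lower main upper vec hpre.1 hpre.2.1 hpre.2.2]
  rw [List.range_eq_range']
  simp
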